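-- pv_equiv track=rewrite | github.com/hoolheart/softlab | softlab/tu/station/visa.py | interprete
-- ===== SOURCE A (Python) =====
-- from typing import (
--     Any,
--     Dict,
--     Optional,
--     Callable,
-- )
--
-- def interprete(value: str) -> Dict[str, str]:
--     parts = value.split(',')
--     info = {}
--     others = ''
--     for idx, val in enumerate(parts):
--         if idx == 0:
--             info['vendor'] = val.strip()
--         elif idx == 1:
--             info['model'] = val.strip()
--         elif idx == 2:
--             info['serial'] = val.strip()
--         elif idx == 3:
--             info['revision'] = val.strip()
--         else:
--             if len(others) == 0:
--                 others = val.strip()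
--             else:
--                 others = f'{others} {val.strip()}'
--     if len(others) > 0:
--         info['others'] = others
--     return info
-- ===== SOURCE B (Python) =====
-- def interprete(value: str):
--     parts = [p.strip() for p in value.split(',')]
--     info = dict(zip(['vendor', 'model', 'serial', 'revision'], parts))
--     others = [p for p in parts[4:] if p]
--     if others:
--         info['others'] = ' '.join(others)
--     return info
-- ===== Notes on version B (the rewrite author's own statement) =====
-- stated objective: simpler
-- what changed: Replaces the single index-branched enumerate loop and its string accumulator with two plain phases: zip the four field labels with the stripped parts into the dict, then filter the non-empty extras and space-join them for the catch-all field.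
-- intended difference: On inputs whose stripped fields past the fourth contain an empty field after a non-empty one, A's accumulator appends a separator for each such empty field and returns an others value with doubled or trailing spaces, while B filters out empty extras and returns the cleanly space-joined extras; B's is the intended catch-all value. — e.g. on interprete("a,b,c,d,e,"): A returns [("vendor", "a"), ("model", "b"), ("serial", "c"), ("revision", "d"), ("others", "e ")], B returns [("vendor", "a"), ("model", "b"), ("serial", "c"), ("revision", "d"), ("others", "e")]
import Mathlib
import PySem

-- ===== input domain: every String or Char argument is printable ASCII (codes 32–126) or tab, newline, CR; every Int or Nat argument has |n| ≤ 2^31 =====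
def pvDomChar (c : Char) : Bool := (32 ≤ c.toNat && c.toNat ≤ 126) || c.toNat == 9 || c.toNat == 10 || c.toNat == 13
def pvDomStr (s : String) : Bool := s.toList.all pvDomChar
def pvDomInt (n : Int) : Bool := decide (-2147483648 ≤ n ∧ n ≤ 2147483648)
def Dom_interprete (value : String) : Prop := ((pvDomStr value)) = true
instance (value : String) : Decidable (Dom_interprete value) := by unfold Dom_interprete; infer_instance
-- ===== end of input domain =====

-- B replaces A's index-branched loop with two plain phases (zip the labels, then filter-and-join the
-- non-empty extras); where A's accumulator emits doubled/trailing spaces for empty extra fields, B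
-- returns the cleanly joined value (stated as D_ below).

-- ===== PORT A =====
-- A's loop body (idx/val branch chain), named for the proofs
def stepA (st : PySem.Dict String String × String) (iv : Int × String) :
    PySem.Dict String String × String :=
  if iv.1 == 0 then (st.1.insert "vendor" (PySem.Str.strip iv.2), st.2)
  else if iv.1 == 1 then (st.1.insert "model" (PySem.Str.strip iv.2), st.2)
  else if iv.1 == 2 then (st.1.insert "serial" (PySem.Str.strip iv.2), st.2)
  else if iv.1 == 3 then (st.1.insert "revision" (PySem.Str.strip iv.2), st.2)
  else if PySem.Str.len st.2 == 0 then (st.1, PySem.Str.strip iv.2)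
  else (st.1, st.2 ++ " " ++ PySem.Str.strip iv.2)

def interprete (value : String) : List (String × String) :=
  let parts := (PySem.Chars.splitOn value.toList ",".toList).map String.ofList  -- value.split(',')
  let st := (PySem.List.enumerate parts 0).foldl stepA (PySem.Dict.empty, "")
  let info := if PySem.Str.len st.2 > 0 then st.1.insert "others" st.2 else st.1
  info.items

-- ===== PORT B =====
def interprete_alt (value : String) : List (String × String) :=
  let parts := ((PySem.Chars.splitOn value.toList ",".toList).map String.ofList).map PySem.Str.strip
  let info := (List.zip ["vendor", "model", "serial", "revision"] parts).foldl
    (fun (d : PySem.Dict String String) lp => d.insert lp.1 lp.2) PySem.Dict.empty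
  let others := (parts.drop 4).filter (fun p => p != "")
  let info := if others.isEmpty then info else info.insert "others" (PySem.Str.join " " others)
  info.items

-- ===== PRECONDITION & SPEC =====
-- On inputs whose stripped fields past the fourth contain an empty field after a non-empty one,
-- A's accumulator appends a separator for each such empty field and returns an others value with
-- doubled or trailing spaces, while B filters out empty extras and returns the cleanly space-joined
-- extras, which is the intended catch-all value.
def D_interprete (value : String) : Prop :=
  "" ∈ (((value.toList.splitOn ',').drop 4).map fun f =>
          String.ofList (PySem.Chars.strip f)).dropWhile (· == "")
instance (value : String) : Decidable (D_interprete value) := by unfold D_interprete; infer_instance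

def Spec_interprete (value : String) (out : List (String × String)) : Prop :=
  ¬ D_interprete value → out = interprete_alt value
instance (value : String) (out : List (String × String)) : Decidable (Spec_interprete value out) := by
  unfold Spec_interprete; infer_instance

def pvDiffWitness_interprete : String := "a,b,c,d,e,"
def pvDiffWitnessOut_interprete : (List (String × String)) × (List (String × String)) :=
  ([("vendor", "a"), ("model", "b"), ("serial", "c"), ("revision", "d"), ("others", "e ")],
   [("vendor", "a"), ("model", "b"), ("serial", "c"), ("revision", "d"), ("others", "e")])

-- ===== CLAIM (what is proved, stated in full; the proofs are below) =====
def Claim_unchanged_interprete : Prop :=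
  ∀ (value : String), Dom_interprete value → Spec_interprete value (interprete value)
def Claim_changed_interprete : Prop :=
  Dom_interprete (pvDiffWitness_interprete) ∧ D_interprete (pvDiffWitness_interprete) ∧
  interprete (pvDiffWitness_interprete) = pvDiffWitnessOut_interprete.1 ∧
  interprete_alt (pvDiffWitness_interprete) = pvDiffWitnessOut_interprete.2 ∧
  pvDiffWitnessOut_interprete.1 ≠ pvDiffWitnessOut_interprete.2
def Claim_exact_interprete : Prop :=
  ∀ (value : String), Dom_interprete value → D_interprete value →
    interprete value ≠ interprete_alt value

-- ===== LEMMAS AND PROOFS =====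

-- A's tail accumulator for 'others'
def accOthers : List String → String → String
  | [], o => o
  | v :: vs, o =>
    accOthers vs (if PySem.Str.len o == 0 then PySem.Str.strip v
                  else o ++ " " ++ PySem.Str.strip v)

theorem len_beq_zero_of_ne {o : String} (h : o ≠ "") : (PySem.Str.len o == 0) = false := by
  simp only [PySem.Str.len]
  simp
  exact h

theorem join_glue (a b : List Char) (L : List (List Char)) :
    PySem.Chars.join " ".toList ((a ++ " ".toList ++ b) :: L)
      = PySem.Chars.join " ".toList (a :: b :: L) := by
  cases L with
  | nil => simp [PySem.Chars.join_singleton, PySem.Chars.join_cons_cons]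
  | cons c L' =>
    rw [PySem.Chars.join_cons_cons, PySem.Chars.join_cons_cons, PySem.Chars.join_cons_cons]
    simp [List.append_assoc]

theorem accOthers_ne (vs : List String) : ∀ o : String, o ≠ "" →
    accOthers vs o = PySem.Str.join " " (o :: vs.map PySem.Str.strip) := by
  induction vs with
  | nil =>
    intro o _
    simp [accOthers, PySem.Str.join, PySem.Chars.join_singleton]
  | cons v vs ih =>
    intro o ho
    have hne : o ++ " " ++ PySem.Str.strip v ≠ "" := by
      intro h
      have := congrArg String.toList h
      simp [String.toList_append] at this
    rw [accOthers, len_beq_zero_of_ne ho]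
    simp only [Bool.false_eq_true, if_false]
    rw [ih _ hne]
    refine String.toList_inj.mp ?_
    simp only [PySem.Str.toList_join, List.map_cons, String.toList_append]
    rw [join_glue]

theorem accOthers_empty (vs : List String) :
    accOthers vs "" = PySem.Str.join " " ((vs.map PySem.Str.strip).dropWhile (· == "")) := by
  induction vs with
  | nil => simp [accOthers, PySem.Str.join, PySem.Chars.join_nil]
  | cons v vs ih =>
    have h : accOthers (v :: vs) "" = accOthers vs (PySem.Str.strip v) := by
      simp [accOthers, PySem.Str.len]
    by_cases hv : PySem.Str.strip v = ""
    · rw [h, hv, ih]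
      simp [hv]
    · rw [h, accOthers_ne vs _ hv]
      simp [hv]

theorem join_len_pos {r : String} (rs : List String) (h : r ≠ "") :
    PySem.Str.len (PySem.Str.join " " (r :: rs)) > 0 := by
  have hr : r.toList ≠ [] := fun h' => h (String.toList_inj.mp (by simp [h']))
  have hr' : 0 < r.toList.length := by
    cases hl : r.toList with
    | nil => exact absurd hl hr
    | cons _ _ => simp
  cases rs with
  | nil =>
    simp only [PySem.Str.len, PySem.Str.toList_join, List.map_cons, List.map_nil,
      PySem.Chars.join_singleton]
    exact_mod_cast hr'
  | cons s ss =>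
    simp only [PySem.Str.len, PySem.Str.toList_join, List.map_cons,
      PySem.Chars.join_cons_cons]
    have : 0 < (r.toList ++ " ".toList ++ PySem.Chars.join " ".toList (s.toList :: ss.map String.toList)).length := by
      simp only [List.length_append]
      omega
    exact_mod_cast this

theorem dropWhile_head_false {p : String → Bool} :
    ∀ (l : List String) (r : String) (rs : List String), l.dropWhile p = r :: rs → p r = false := by
  intro l
  induction l with
  | nil => intro r rs h; simp [List.dropWhile] at h
  | cons x l ih =>
    intro r rs h
    cases hx : p x with
    | true => simp [hx] at h; exact ih r rs h
    | false =>
      simp [hx] at h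
      exact h.1 ▸ hx

theorem foldA_tail (rest : List String) : ∀ (s : Int), 4 ≤ s →
    ∀ (d : PySem.Dict String String) (o : String),
    (PySem.List.enumerate rest s).foldl stepA (d, o) = (d, accOthers rest o) := by
  induction rest with
  | nil => intro s _ d o; simp [PySem.List.enumerate_nil, accOthers]
  | cons v vs ih =>
    intro s hs d o
    rw [PySem.List.enumerate_cons]
    have h0 : (s == 0) = false := by simp; omega
    have h1 : (s == 1) = false := by simp; omega
    have h2 : (s == 2) = false := by simp; omega
    have h3 : (s == 3) = false := by simp; omega
    simp only [List.foldl, stepA, h0, h1, h2, h3, if_false, Bool.false_eq_true]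
    rw [accOthers]
    by_cases hc : (PySem.Str.len o == 0) = true
    · rw [if_pos hc, if_pos hc]
      exact ih (s + 1) (by omega) d _
    · rw [if_neg hc, if_neg hc]
      exact ih (s + 1) (by omega) d _

-- outside D_, the non-empty filter and A's leading-empty drop coincide
theorem filter_eq_dropWhile : ∀ (t : List String),
    "" ∉ t.dropWhile (fun p => p == "") →
    t.filter (fun p => p != "") = t.dropWhile (fun p => p == "") := by
  intro t
  induction t with
  | nil => intro _; rfl
  | cons x t ih =>
    intro h
    by_cases hx : x = ""
    · subst hx
      simp only [List.dropWhile] at h ⊢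
      simp only [List.filter]
      simpa using ih (by simpa using h)
    · have hx' : (x == "") = false := by simp [hx]
      simp only [List.dropWhile, hx'] at h ⊢
      have hnot : ∀ a ∈ x :: t, (a != "") = true := by
        intro a ha
        simp only [bne_iff_ne, ne_eq]
        intro e
        exact h (e ▸ ha)
      exact List.filter_eq_self.mpr hnot

-- the shared lemma: for any split result 'parts' outside the changed region, A's body equals B's body
theorem body_eq (parts : List String)
    (hD : "" ∉ ((parts.drop 4).map PySem.Str.strip).dropWhile (fun p => p == "")) :
    (let st := (PySem.List.enumerate parts 0).foldl stepA (PySem.Dict.empty, "")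
     let info := if PySem.Str.len st.2 > 0 then st.1.insert "others" st.2 else st.1
     info.items)
    =
    (let parts' := parts.map PySem.Str.strip
     let info := (List.zip ["vendor", "model", "serial", "revision"] parts').foldl
        (fun (d : PySem.Dict String String) lp => d.insert lp.1 lp.2) PySem.Dict.empty
     let others := (parts'.drop 4).filter (fun p => p != "")
     let info := if others.isEmpty then info else info.insert "others" (PySem.Str.join " " others)
     info.items) := by
  rcases parts with _ | ⟨a, _ | ⟨b, _ | ⟨c, _ | ⟨d, rest⟩⟩⟩⟩
  · simp [PySem.List.enumerate_nil]
  · simp [PySem.List.enumerate_cons, PySem.List.enumerate_nil, stepA]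
  · simp [PySem.List.enumerate_cons, PySem.List.enumerate_nil, stepA]
  · simp [PySem.List.enumerate_cons, PySem.List.enumerate_nil, stepA]
  · -- five or more fields
    rw [PySem.List.enumerate_cons, PySem.List.enumerate_cons, PySem.List.enumerate_cons,
      PySem.List.enumerate_cons]
    simp only [List.foldl_cons, stepA,
      show ((0 : Int) == 0) = true by decide, show ((0 : Int) + 1 == 0) = false by decide,
      show ((0 : Int) + 1 == 1) = true by decide,
      show ((0 : Int) + 1 + 1 == 0) = false by decide,
      show ((0 : Int) + 1 + 1 == 1) = false by decide,
      show ((0 : Int) + 1 + 1 == 2) = true by decide,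
      show ((0 : Int) + 1 + 1 + 1 == 0) = false by decide,
      show ((0 : Int) + 1 + 1 + 1 == 1) = false by decide,
      show ((0 : Int) + 1 + 1 + 1 == 2) = false by decide,
      show ((0 : Int) + 1 + 1 + 1 == 3) = true by decide,
      Bool.false_eq_true, if_true, if_false]
    rw [show ((0 : Int) + 1 + 1 + 1 + 1) = 4 by norm_num,
      foldA_tail rest 4 (by norm_num), accOthers_empty rest]
    simp only [List.drop_succ_cons, List.drop_zero] at hD
    simp only [List.map_cons, List.zip_cons_cons, List.zip_nil_left, List.foldl_cons,
      List.foldl_nil, List.drop_succ_cons, List.drop_zero]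
    rw [filter_eq_dropWhile _ hD]
    cases hrem : (rest.map PySem.Str.strip).dropWhile (· == "") with
    | nil =>
      simp only [hrem] at *
      simp [PySem.Str.join, PySem.Chars.join_nil, PySem.Str.len]
    | cons r rs =>
      have hr : r ≠ "" := by
        have := dropWhile_head_false (rest.map PySem.Str.strip) r rs hrem
        simpa using this
      rw [if_pos (join_len_pos rs hr)]
      simp

-- proof-side field splitter bridging List.splitOn to PySem.Chars.splitOn
def pvFields : List Char → List (List Char)
  | [] => [[]]
  | c :: rest =>
    if c = ',' then [] :: pvFields rest
    else
      match pvFields rest with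
      | [] => [[c]]
      | f :: fs => (c :: f) :: fs

theorem pvFields_ne_nil (cs : List Char) : pvFields cs ≠ [] := by
  cases cs with
  | nil => simp [pvFields]
  | cons c rest =>
    simp only [pvFields]
    split
    · simp
    · split <;> simp

theorem go_spec : ∀ (l : List Char) (fuel : Nat) (cur : List Char) (acc : List (List Char)),
    l.length < fuel →
    PySem.Chars.splitOn.go [','] fuel l cur acc
      = acc.reverse ++ (match pvFields l with
                        | [] => [cur.reverse]
                        | f :: fs => (cur.reverse ++ f) :: fs) := by
  intro l
  induction l with
  | nil =>
    intro fuel cur acc h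
    cases fuel with
    | zero => omega
    | succ n => simp [PySem.Chars.splitOn.go, pvFields]
  | cons c rest ih =>
    intro fuel cur acc h
    cases fuel with
    | zero => omega
    | succ n =>
      rw [PySem.Chars.splitOn.go]
      by_cases hc : c = ','
      · subst hc
        have hpre : List.isPrefixOf [','] (',' :: rest) = true := by simp [List.isPrefixOf]
        simp only [hpre, if_true, List.length_cons, List.length_nil, List.drop_succ_cons,
          List.drop_zero]
        rw [ih n [] (cur.reverse :: acc) (by simpa using Nat.lt_of_succ_lt_succ h)]
        simp only [pvFields, if_true]
        cases hp : pvFields rest with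
        | nil => exact absurd hp (pvFields_ne_nil rest)
        | cons f fs => simp
      · have hpre : List.isPrefixOf [','] (c :: rest) = false := by
          simp [List.isPrefixOf]; intro h'; exact absurd h'.symm hc
        simp only [hpre, Bool.false_eq_true, if_false]
        rw [ih n (c :: cur) acc (by simpa using Nat.lt_of_succ_lt_succ h)]
        simp only [pvFields, hc, if_false]
        cases hp : pvFields rest with
        | nil => exact absurd hp (pvFields_ne_nil rest)
        | cons f fs => simp

theorem splitOn_comma (cs : List Char) :
    PySem.Chars.splitOn cs ",".toList = pvFields cs := by
  have h : (",".toList : List Char) = [','] := by decide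
  rw [h]
  show PySem.Chars.splitOn.go [','] (cs.length + 1) cs [] [] = _
  rw [go_spec cs (cs.length + 1) [] [] (by omega)]
  cases hp : pvFields cs with
  | nil => exact absurd hp (pvFields_ne_nil cs)
  | cons f fs => simp

theorem listSplitOn_eq_pvFields (cs : List Char) : cs.splitOn ',' = pvFields cs := by
  induction cs with
  | nil => rfl
  | cons c rest ih =>
    rw [List.splitOn] at *
    rw [List.splitOnP_cons, ih]
    by_cases hc : c = ','
    · subst hc; simp [pvFields]
    · have hb : (c == ',') = false := by simp [hc]
      simp only [hb, Bool.false_eq_true, if_false, pvFields, hc]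
      cases hp : pvFields rest with
      | nil => exact absurd hp (pvFields_ne_nil rest)
      | cons f fs => simp [List.modifyHead]

theorem strip_ofList_swap (f : List Char) :
    PySem.Str.strip (String.ofList f) = String.ofList (PySem.Chars.strip f) := by
  apply String.toList_inj.mp
  simp [pysem]

-- the ports' stripped-tail list equals the one D_interprete is stated over
theorem tailLists_eq (cs : List Char) :
    (((PySem.Chars.splitOn cs ",".toList).map String.ofList).drop 4).map PySem.Str.strip
      = ((cs.splitOn ',').drop 4).map fun f => String.ofList (PySem.Chars.strip f) := by
  rw [splitOn_comma, listSplitOn_eq_pvFields, ← List.map_drop, List.map_map]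
  rw [show (PySem.Str.strip ∘ String.ofList) = (fun f => String.ofList (PySem.Chars.strip f))
        from funext (fun f => strip_ofList_swap f)]

-- A's tail accumulator for 'others'
theorem filter_len_lt (L : List String) (h : "" ∈ L) :
    (L.filter (fun p => p != "")).length < L.length := by
  apply List.length_filter_lt_length_iff_exists.mpr
  exact ⟨"", h, by simp⟩

theorem sum_filter_lens (L : List String) :
    ((L.filter (fun p => p != "")).map (fun s => s.toList.length)).sum
      = (L.map (fun s => s.toList.length)).sum := by
  induction L with
  | nil => rfl
  | cons x L ih =>
    by_cases hx : x = ""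
    · subst hx; simpa using ih
    · have hb : (x != "") = true := by simp [hx]
      simp only [List.filter_cons, hb, if_true, List.map_cons, List.sum_cons, ih]

theorem join_chars_length : ∀ (L : List (List Char)), L ≠ [] →
    (PySem.Chars.join [' '] L).length = (L.map List.length).sum + (L.length - 1) := by
  intro L
  induction L with
  | nil => intro h; exact absurd rfl h
  | cons a L ih =>
    intro _
    cases L with
    | nil => simp [PySem.Chars.join_singleton]
    | cons b L' =>
      rw [PySem.Chars.join_cons_cons]
      have hj := ih (by simp)
      simp only [List.length_append, List.map_cons, List.sum_cons, List.length_cons,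
        List.length_nil, hj]
      omega

theorem str_join_len (L : List String) (h : L ≠ []) :
    (PySem.Str.join " " L).toList.length
      = (L.map (fun s => s.toList.length)).sum + (L.length - 1) := by
  rw [PySem.Str.toList_join]
  rw [show (" ".toList : List Char) = [' '] from by decide]
  rw [join_chars_length (L.map String.toList) (by simpa using h)]
  simp only [List.map_map, List.length_map]
  rfl

theorem join_ne (r : String) (rs : List String) (hr : r ≠ "") (hmem : "" ∈ rs) :
    PySem.Str.join " " (r :: rs) ≠ PySem.Str.join " " ((r :: rs).filter (fun p => p != "")) := by
  intro h
  have hL : ("" : String) ∈ r :: rs := List.mem_cons_of_mem r hmem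
  have h1 := str_join_len (r :: rs) (by simp)
  have h2 := str_join_len ((r :: rs).filter (fun p => p != ""))
  have hfl : (r :: rs).filter (fun p => p != "") ≠ [] := by
    have hcons : (r :: rs).filter (fun p => p != "") = r :: rs.filter (fun p => p != "") := by
      simp [hr]
    rw [hcons]
    simp
  have h2' := h2 hfl
  rw [h] at h1
  rw [sum_filter_lens] at h2'
  have hlt := filter_len_lt (r :: rs) hL
  have hfpos : 0 < ((r :: rs).filter (fun p => p != "")).length := List.length_pos_iff.mpr hfl
  have hAB := h1.symm.trans h2'
  have h3 := Nat.add_left_cancel hAB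
  omega

theorem filter_eq_filter_dropWhile (T : List String) :
    T.filter (fun p => p != "") = (T.dropWhile (fun p => p == "")).filter (fun p => p != "") := by
  induction T with
  | nil => rfl
  | cons x T ih =>
    by_cases hx : x = ""
    · subst hx; simpa [List.dropWhile, List.filter] using ih
    · have hx1 : (x == "") = false := by simp [hx]
      have hx2 : (x != "") = true := by simp [hx]
      simp [List.dropWhile, List.filter, hx1, hx2]

-- the two dicts disagree at "others" whenever an empty stripped extra follows a non-empty one
theorem insert_items_ne (d : PySem.Dict String String) (k x y : String) (hxy : x ≠ y) :
    (d.insert k x).items ≠ (d.insert k y).items := by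
  intro h
  have hd := PySem.Dict.ext h
  have h2 := congrArg (fun e => PySem.Dict.get? e k) hd
  simp only [PySem.Dict.get?_insert_self, Option.some.injEq] at h2
  exact hxy h2

theorem body_ne (parts : List String)
    (hD : "" ∈ ((parts.drop 4).map PySem.Str.strip).dropWhile (fun p => p == "")) :
    (let st := (PySem.List.enumerate parts 0).foldl stepA (PySem.Dict.empty, "")
     let info := if PySem.Str.len st.2 > 0 then st.1.insert "others" st.2 else st.1
     info.items)
    ≠
    (let parts' := parts.map PySem.Str.strip
     let info := (List.zip ["vendor", "model", "serial", "revision"] parts').foldl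
        (fun (d : PySem.Dict String String) lp => d.insert lp.1 lp.2) PySem.Dict.empty
     let others := (parts'.drop 4).filter (fun p => p != "")
     let info := if others.isEmpty then info else info.insert "others" (PySem.Str.join " " others)
     info.items) := by
  rcases parts with _ | ⟨a, _ | ⟨b, _ | ⟨c, _ | ⟨d, rest⟩⟩⟩⟩
  · simp at hD
  · simp at hD
  · simp at hD
  · simp at hD
  · -- five or more fields
    rw [PySem.List.enumerate_cons, PySem.List.enumerate_cons, PySem.List.enumerate_cons,
      PySem.List.enumerate_cons]
    simp only [List.foldl_cons, stepA,
      show ((0 : Int) == 0) = true by decide, show ((0 : Int) + 1 == 0) = false by decide,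
      show ((0 : Int) + 1 == 1) = true by decide,
      show ((0 : Int) + 1 + 1 == 0) = false by decide,
      show ((0 : Int) + 1 + 1 == 1) = false by decide,
      show ((0 : Int) + 1 + 1 == 2) = true by decide,
      show ((0 : Int) + 1 + 1 + 1 == 0) = false by decide,
      show ((0 : Int) + 1 + 1 + 1 == 1) = false by decide,
      show ((0 : Int) + 1 + 1 + 1 == 2) = false by decide,
      show ((0 : Int) + 1 + 1 + 1 == 3) = true by decide,
      Bool.false_eq_true, if_true, if_false]
    rw [show ((0 : Int) + 1 + 1 + 1 + 1) = 4 by norm_num,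
      foldA_tail rest 4 (by norm_num), accOthers_empty rest]
    simp only [List.drop_succ_cons, List.drop_zero] at hD
    simp only [List.map_cons, List.zip_cons_cons, List.zip_nil_left, List.foldl_cons,
      List.foldl_nil, List.drop_succ_cons, List.drop_zero]
    cases hrem : (rest.map PySem.Str.strip).dropWhile (· == "") with
    | nil =>
      rw [show ((rest.map PySem.Str.strip).dropWhile (fun p => p == "")) = [] from hrem] at hD
      simp at hD
    | cons r rs =>
      rw [show ((rest.map PySem.Str.strip).dropWhile (fun p => p == "")) = r :: rs from hrem] at hD
      have hr : r ≠ "" := by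
        have := dropWhile_head_false (rest.map PySem.Str.strip) r rs hrem
        simpa using this
      have hmem : "" ∈ rs := by
        rcases List.mem_cons.mp hD with h | h
        · exact absurd h.symm hr
        · exact h
      rw [if_pos (join_len_pos rs hr)]
      have hfilter : (rest.map PySem.Str.strip).filter (fun p => p != "")
          = (r :: rs).filter (fun p => p != "") := by
        rw [filter_eq_filter_dropWhile (rest.map PySem.Str.strip), hrem]
      rw [hfilter]
      have hie : ((r :: rs).filter (fun p => p != "")).isEmpty = false := by
        have : (r :: rs).filter (fun p => p != "") = r :: rs.filter (fun p => p != "") := by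
          simp [hr]
        rw [this]
        rfl
      simp only [hie, Bool.false_eq_true, if_false]
      exact insert_items_ne _ "others" _ _ (join_ne r rs hr hmem)

-- ===== VERDICT (by name: the statement is the Claim_ definition above) =====
theorem interprete_spec : Claim_unchanged_interprete := by
  intro value _
  intro hD
  unfold interprete interprete_alt
  exact body_eq _ (by
    intro hmem
    apply hD
    unfold D_interprete
    rw [← tailLists_eq]
    simpa using hmem)

theorem interprete_changed : Claim_changed_interprete := by
  unfold Claim_changed_interprete; decide

theorem interprete_tight : Claim_exact_interprete := by
  intro value _ hD
  unfold interprete interprete_alt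
  apply body_ne
  unfold D_interprete at hD
  rw [← tailLists_eq] at hD
  simpa using hD
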